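-- pv_equiv track=rewrite | github.com/nachogarcia1/TP-Mate-Discreta | src/output.py | format_orden_fallos
-- ===== SOURCE A (Python) =====
-- def wrap_list(items, prefix="  ", max_width=72):
--     """
--     Envuelve una lista de items en múltiples líneas si es necesario.
--
--     Args:
--         items: Lista de strings a formatear
--         prefix: Prefijo para cada línea
--         max_width: Ancho máximo de línea
--
--     Returns:
--         String formateado con saltos de línea apropiados
--     """
--     lines = []
--     line = prefix
--     for j, item in enumerate(items):
--         if len(line) + len(item) + 2 > max_width:
--             lines.append(line)
--             line = prefix
--         line += item
--         if j < len(items) - 1: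
--             line += ", "
--     lines.append(line)
--     return "\n".join(lines)
--
-- def format_orden_fallos(nodos_grados):
--     """
--     Formatea la salida de orden de fallos agrupado por grado.
--
--     Args:
--         nodos_grados: Lista de tuplas (nodo, grado)
--
--     Returns:
--         String formateado con el orden de fallos
--     """
--     from itertools import groupby
--
--     output = []
--     output.append("=" * 60)
--     output.append("ORDEN DE FALLOS - RED ELÉCTRICA")
--     output.append("=" * 60)
--     output.append("Nodos ordenados por criticidad (menor grado = más crítico):")
--     output.append("")
--
--     # Asegurar orden determinista: por grado, luego alfabéticamente
--     nodos_grados_sorted = sorted(nodos_grados, key=lambda x: (x[1], x[0]))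
--
--     for grado, nodos_grupo in groupby(nodos_grados_sorted, key=lambda x: x[1]):
--         nodos_list = sorted([n[0] for n in nodos_grupo])
--         output.append(f"Grado {grado} ({len(nodos_list)} nodos):")
--         output.append(wrap_list(nodos_list))
--         output.append("")
--
--     output.append("")
--     return "\n".join(output)
-- ===== SOURCE B (Python) =====
-- def wrap_list(items, prefix="  ", max_width=72):
--     lines = []
--     line = prefix
--     for j, item in enumerate(items):
--         if len(line) + len(item) + 2 > max_width:
--             lines.append(line)
--             line = prefix
--         line += item
--         if j < len(items) - 1:
--             line += ", "
--     lines.append(line)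
--     return "\n".join(lines)
--
-- def format_orden_fallos(nodos_grados):
--     # Group in one unsorted pass instead of sorting the whole list and using groupby.
--     grupos = {}
--     for nodo, grado in nodos_grados:
--         grupos.setdefault(grado, []).append(nodo)
--     partes = []
--     partes.append("=" * 60)
--     partes.append("ORDEN DE FALLOS - RED ELÉCTRICA")
--     partes.append("=" * 60)
--     partes.append("Nodos ordenados por criticidad (menor grado = más crítico):")
--     partes.append("")
--     for grado in sorted(grupos):
--         nodos = sorted(grupos[grado])
--         partes.append(f"Grado {grado} ({len(nodos)} nodos):")
--         partes.append(wrap_list(nodos))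
--         partes.append("")
--     partes.append("")
--     return "\n".join(partes)
-- ===== Notes on version B (the rewrite author's own statement) =====
-- stated objective: simpler
-- what changed: B groups nodes by grado with a single dict-building pass and then iterates the sorted keys, instead of A's global sort of all (nodo, grado) pairs followed by itertools.groupby over consecutive runs.
import Mathlib
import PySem

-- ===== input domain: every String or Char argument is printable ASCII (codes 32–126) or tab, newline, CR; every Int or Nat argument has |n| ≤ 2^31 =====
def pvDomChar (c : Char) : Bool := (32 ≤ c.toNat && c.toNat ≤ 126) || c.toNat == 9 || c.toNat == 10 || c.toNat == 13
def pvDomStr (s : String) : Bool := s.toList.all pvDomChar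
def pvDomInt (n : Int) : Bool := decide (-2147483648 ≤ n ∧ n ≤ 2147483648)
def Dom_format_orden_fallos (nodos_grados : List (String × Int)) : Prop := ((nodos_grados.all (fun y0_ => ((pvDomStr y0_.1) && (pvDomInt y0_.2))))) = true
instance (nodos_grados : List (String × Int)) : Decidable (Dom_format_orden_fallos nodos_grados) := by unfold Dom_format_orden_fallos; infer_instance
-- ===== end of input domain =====

-- B replaces A's global (grado, nodo) sort + itertools.groupby by a one-pass grouping dict
-- iterated over its sorted keys (objective: simpler).

-- ===== PORT A =====
-- wrap_list(items): shared helper — both Pythons contain the identical function.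
def pvWrap (items : List String) : List Char :=
  let st := (PySem.List.enumerate items).foldl
    (fun (st : List (List Char) × List Char) ji =>
      let st1 := if st.2.length + ji.2.toList.length + 2 > 72 then (st.1 ++ [st.2], [' ', ' ']) else st
      let line := st1.2 ++ ji.2.toList
      let line := if ji.1 < (items.length : Int) - 1 then line ++ [',', ' '] else line
      (st1.1, line)) ([], [' ', ' '])
  PySem.Chars.join ['\n'] (st.1 ++ [st.2])

-- the five header lines appended by both Pythons (identical literals in A and B)
def pvHeader : List (List Char) :=
  [List.replicate 60 '=',
   "ORDEN DE FALLOS - RED ELÉCTRICA".toList,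
   List.replicate 60 '=',
   "Nodos ordenados por criticidad (menor grado = más crítico):".toList,
   []]

-- f"Grado {grado} ({n} nodos):"
def pvGradoLine (g : Int) (n : Nat) : List Char :=
  "Grado ".toList ++ PySem.Int.toChars g ++ " (".toList ++ PySem.Int.toChars (n : Int) ++ " nodos):".toList

-- the three lines both Pythons append per group
def pvBlock (g : Int) (nodos : List String) : List (List Char) :=
  [pvGradoLine g nodos.length, pvWrap nodos, []]

-- itertools.groupby(·, key=lambda x: x[1]) on a list, each group materialised
-- (exact here: A consumes each group eagerly inside the loop body)
def pvGroupRuns : List (String × Int) → List (Int × List (String × Int))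
  | [] => []
  | x :: xs =>
      (x.2, x :: xs.takeWhile (fun p => p.2 == x.2)) :: pvGroupRuns (xs.dropWhile (fun p => p.2 == x.2))
  termination_by l => l.length
  decreasing_by
    simpa using Nat.lt_succ_of_le (List.length_dropWhile_le _ _)

def format_orden_fallos (nodos_grados : List (String × Int)) : String :=
  let s := PySem.List.sorted2 nodos_grados (fun x => x.2) (fun x => x.1)
  let output := (pvGroupRuns s).foldl
    (fun out gr => out ++ pvBlock gr.1 (PySem.List.sorted (gr.2.map (fun p => p.1)) (fun x => x)))
    pvHeader
  String.ofList (PySem.Chars.join ['\n'] (output ++ [[]]))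

-- ===== PORT B =====
def format_orden_fallos_alt (nodos_grados : List (String × Int)) : String :=
  let grupos : PySem.Dict Int (List String) :=
    nodos_grados.foldl (fun d p => d.modify p.2 ([] : List String) (fun v => v ++ [p.1])) PySem.Dict.empty
  let partes := (PySem.List.sorted grupos.keys (fun x => x)).foldl
    (fun out g => out ++ pvBlock g (PySem.List.sorted (grupos.getD g []) (fun x => x)))
    pvHeader
  String.ofList (PySem.Chars.join ['\n'] (partes ++ [[]]))

-- ===== PRECONDITION & SPEC =====
def Spec_format_orden_fallos (nodos_grados : List (String × Int)) (out : String) : Prop := out = format_orden_fallos_alt nodos_grados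
instance (nodos_grados : List (String × Int)) (out : String) : Decidable (Spec_format_orden_fallos nodos_grados out) := by unfold Spec_format_orden_fallos; infer_instance

-- ===== CLAIM (what is proved, stated in full; the proofs are below) =====
def Claim_equal_format_orden_fallos : Prop := ∀ (nodos_grados : List (String × Int)), Dom_format_orden_fallos nodos_grados → Spec_format_orden_fallos nodos_grados (format_orden_fallos nodos_grados)

-- ===== LEMMAS AND PROOFS =====

-- sorted2's insertion keeps the list nondecreasing in the FIRST key
lemma pv_insertBy_pairwise {α κ : Type} [LinearOrder κ] (k : α → κ) (before : α → α → Bool)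
    (h1 : ∀ a b, before a b = true → k a ≤ k b) (h2 : ∀ a b, before a b = false → k b ≤ k a)
    (x : α) (l : List α) (hl : List.Pairwise (fun a b => k a ≤ k b) l) :
    List.Pairwise (fun a b => k a ≤ k b) (PySem.List.insertBy before x l) := by
  induction l with
  | nil => simp [PySem.List.insertBy]
  | cons y ys ih =>
      rw [List.pairwise_cons] at hl
      obtain ⟨hy, hys⟩ := hl
      by_cases hb : before x y = true
      · simp only [PySem.List.insertBy, hb, if_true]
        refine List.Pairwise.cons ?_ (List.Pairwise.cons hy hys)
        intro z hz
        rcases List.mem_cons.mp hz with rfl | hz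
        · exact h1 _ _ hb
        · exact le_trans (h1 _ _ hb) (hy _ hz)
      · simp only [PySem.List.insertBy, hb]
        refine List.Pairwise.cons ?_ (ih hys)
        intro z hz
        rcases (PySem.List.mem_insertBy before x z ys).mp hz with rfl | hz
        · exact h2 _ _ (by simpa using hb)
        · exact hy _ hz

-- the result of sorted2 is nondecreasing in the first key
lemma pv_sorted2_pairwise_fst (ng : List (String × Int)) :
    List.Pairwise (fun a b => a.2 ≤ b.2)
      (PySem.List.sorted2 ng (fun x => x.2) (fun x => x.1)) := by
  show List.Pairwise _ (List.foldl (fun acc x => PySem.List.insertBy _ x acc) [] ng)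
  generalize hbef : (fun a b : String × Int =>
      decide (a.2 < b.2) || !decide (b.2 < a.2) && decide (a.1 < b.1)) = before
  have h1 : ∀ a b, before a b = true → a.2 ≤ b.2 := by
    intro a b h; subst hbef; simp only [Bool.or_eq_true, Bool.and_eq_true, decide_eq_true_eq,
      Bool.not_eq_true', decide_eq_false_iff_not] at h
    rcases h with h | ⟨h, _⟩
    · exact le_of_lt h
    · exact le_of_not_gt h
  have h2 : ∀ a b, before a b = false → b.2 ≤ a.2 := by
    intro a b h; subst hbef
    simp only [Bool.or_eq_false_iff, decide_eq_false_iff_not] at h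
    exact le_of_not_gt h.1
  clear hbef
  suffices H : ∀ (l : List (String × Int)) (acc : List (String × Int)),
      List.Pairwise (fun a b => a.2 ≤ b.2) acc →
      List.Pairwise (fun a b => a.2 ≤ b.2) (l.foldl (fun acc x => PySem.List.insertBy before x acc) acc) by
    exact H ng [] (by simp)
  intro l
  induction l with
  | nil => intro acc h; simpa using h
  | cons x xs ih =>
      intro acc h
      exact ih _ (pv_insertBy_pairwise (fun p => p.2) before h1 h2 x acc h)

-- ofList is invariant (up to permutation) under permutation of its input
lemma pv_ofList_perm {α : Type} [BEq α] [LawfulBEq α] {l1 l2 : List α} (h : l1.Perm l2) :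
    (PySem.Set.ofList l1).Perm (PySem.Set.ofList l2) := by
  refine (List.perm_ext_iff_of_nodup (PySem.Set.nodup_ofList l1) (PySem.Set.nodup_ofList l2)).mpr ?_
  intro a
  simp only [PySem.Set.mem_ofList]
  exact ⟨fun ha => h.mem_iff.mp ha, fun ha => h.mem_iff.mpr ha⟩

-- after dropWhile of the first key-run, every key is strictly larger
lemma pv_dropWhile_gt (x : String × Int) (xs : List (String × Int))
    (hx_le : ∀ p ∈ xs, x.2 ≤ p.2)
    (hpr : List.Pairwise (fun a b => a.2 ≤ b.2) xs) :
    ∀ p ∈ xs.dropWhile (fun p => p.2 == x.2), x.2 < p.2 := by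
  intro p hp
  have hne : xs.dropWhile (fun p => p.2 == x.2) ≠ [] := List.ne_nil_of_mem hp
  have hsubl : (xs.dropWhile (fun p => p.2 == x.2)).Sublist xs := List.dropWhile_sublist _
  have hpr_r : List.Pairwise (fun a b => a.2 ≤ b.2) (xs.dropWhile (fun p => p.2 == x.2)) :=
    hpr.sublist hsubl
  have hhead := List.head_dropWhile_not (fun p => p.2 == x.2) (l := xs) hne
  obtain ⟨y, ys, hys⟩ := List.exists_cons_of_ne_nil hne
  rw [hys] at hp hpr_r hsubl
  simp only [hys, List.head_cons] at hhead
  have hy_mem : y ∈ xs := hsubl.mem (List.mem_cons_self)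
  have hxy : x.2 < y.2 := by
    refine lt_of_le_of_ne (hx_le _ hy_mem) ?_
    intro h
    rw [h] at hhead
    simp at hhead
  rw [List.pairwise_cons] at hpr_r
  rcases List.mem_cons.mp hp with rfl | hp
  · exact hxy
  · exact lt_of_lt_of_le hxy (hpr_r.1 p hp)

-- groupby over a list nondecreasing in the key = sorted distinct keys, each with its filter
lemma pv_groupRuns_eq (s : List (String × Int))
    (hs : List.Pairwise (fun a b => a.2 ≤ b.2) s) :
    pvGroupRuns s =
      (PySem.List.sorted (PySem.Set.ofList (s.map (fun p => p.2))) (fun x => x)).map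
        (fun g => (g, s.filter (fun p => p.2 == g))) := by
  induction s using pvGroupRuns.induct with
  | case1 => simp [pvGroupRuns, PySem.Set.ofList_nil, PySem.List.sorted]
  | case2 x xs ih =>
      set t := xs.takeWhile (fun p => p.2 == x.2) with ht
      set r := xs.dropWhile (fun p => p.2 == x.2) with hr
      have hxs : t ++ r = xs := List.takeWhile_append_dropWhile
      have hT : ∀ p ∈ t, p.2 = x.2 := by
        intro p hp
        have := List.mem_takeWhile_imp hp
        simpa using this
      have hx_le : ∀ p ∈ xs, x.2 ≤ p.2 := by
        intro p hp; exact (List.pairwise_cons.mp hs).1 p hp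
      have hR : ∀ p ∈ r, x.2 < p.2 := by
        rw [hr]
        exact pv_dropWhile_gt x xs hx_le (List.pairwise_cons.mp hs).2
      have hRpair : List.Pairwise (fun a b => a.2 ≤ b.2) r := by
        rw [hr]; exact ((List.pairwise_cons.mp hs).2).sublist (List.dropWhile_sublist _)
      -- the sorted distinct keys of x :: xs are x.2 followed by those of r
      have hK : PySem.List.sorted (PySem.Set.ofList ((x :: xs).map (fun p => p.2))) (fun x => x) =
          x.2 :: PySem.List.sorted (PySem.Set.ofList (r.map (fun p => p.2))) (fun x => x) := by
        refine PySem.List.eq_of_perm_of_pairwise_le_of_injective (fun x => x) Function.injective_id ?_ ?_ ?_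
        · refine ((PySem.List.sorted_perm _ _ _).trans ?_).trans
            ((List.Perm.cons x.2 (PySem.List.sorted_perm _ _ _)).symm)
          refine (List.perm_ext_iff_of_nodup (PySem.Set.nodup_ofList _) ?_).mpr ?_
          · refine List.Nodup.cons ?_ (PySem.Set.nodup_ofList _)
            intro hmem
            rcases List.mem_map.mp ((PySem.Set.mem_ofList _ _).mp hmem) with ⟨p, hp, hpe⟩
            exact absurd hpe (ne_of_lt (hR p hp)).symm
          · intro g
            simp only [PySem.Set.mem_ofList, List.mem_cons, List.mem_map]
            constructor
            · rintro ⟨p, hp | hp, rfl⟩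
              · exact Or.inl (by rw [hp])
              · rw [← hxs] at hp
                rcases List.mem_append.mp hp with hp | hp
                · exact Or.inl (hT p hp)
                · exact Or.inr ⟨p, hp, rfl⟩
            · rintro (rfl | ⟨p, hp, rfl⟩)
              · exact ⟨x, Or.inl rfl, rfl⟩
              · refine ⟨p, Or.inr ?_, rfl⟩
                rw [← hxs]; exact List.mem_append.mpr (Or.inr hp)
        · exact PySem.List.sorted_pairwise _ _
        · refine List.Pairwise.cons ?_ (PySem.List.sorted_pairwise _ _)
          intro g hg
          have hg' := ((PySem.List.sorted_perm _ _ _).mem_iff).mp hg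
          rcases List.mem_map.mp ((PySem.Set.mem_ofList _ _).mp hg') with ⟨p, hp, rfl⟩
          exact le_of_lt (hR p hp)
      have hfilter_head : (x :: xs).filter (fun p => p.2 == x.2) = x :: t := by
        have h1 : t.filter (fun p => p.2 == x.2) = t :=
          List.filter_eq_self.mpr (fun p hp => by simp [hT p hp])
        have h2 : r.filter (fun p => p.2 == x.2) = [] :=
          List.filter_eq_nil_iff.mpr (fun p hp => by
            have : p.2 ≠ x.2 := (ne_of_lt (hR p hp)).symm
            simp [this])
        rw [List.filter_cons, if_pos (by simp), ← hxs, List.filter_append, h1, h2, List.append_nil]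
      have hfilter_tail : ∀ g ∈ PySem.List.sorted (PySem.Set.ofList (r.map (fun p => p.2))) (fun x => x),
          (x :: xs).filter (fun p => p.2 == g) = r.filter (fun p => p.2 == g) := by
        intro g hg
        have hg' := ((PySem.List.sorted_perm _ _ _).mem_iff).mp hg
        rcases List.mem_map.mp ((PySem.Set.mem_ofList _ _).mp hg') with ⟨q, hq, rfl⟩
        have hgx : ¬ (x.2 = q.2) := ne_of_lt (hR q hq)
        have h1 : t.filter (fun p => p.2 == q.2) = [] :=
          List.filter_eq_nil_iff.mpr (fun p hp => by
            have hpx : p.2 = x.2 := hT p hp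
            simp [hpx]
            exact fun h => hgx h)
        rw [List.filter_cons, if_neg (by simpa using hgx), ← hxs, List.filter_append, h1,
          List.nil_append]
      rw [pvGroupRuns, hK, List.map_cons, ← hr, ← ht, hfilter_head, ih hRpair]
      congr 1
      exact (List.map_congr_left (fun g hg => by rw [hfilter_tail g hg])).symm

-- B's grouping dict: its keys and its per-key lists, computed
lemma pv_dict_getD (ng : List (String × Int)) (g : Int) :
    (ng.foldl (fun d p => d.modify p.2 ([] : List String) (fun v => v ++ [p.1]))
        PySem.Dict.empty).getD g [] =
      (ng.filter (fun p => p.2 == g)).map (fun p => p.1) := by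
  have hfold : ng.foldl (fun d p => d.modify p.2 ([] : List String) (fun v => v ++ [p.1]))
        PySem.Dict.empty =
      (ng.map (fun p => (p.2, p.1))).foldl
        (fun d q => d.modify q.1 ([] : List String) (fun v => v ++ [q.2])) PySem.Dict.empty := by
    rw [List.foldl_map]
  rw [hfold, PySem.Dict.getD_foldl_modify_append, List.filter_map]
  simp [Function.comp_def, List.map_map]

lemma pv_dict_keys (ng : List (String × Int)) :
    (ng.foldl (fun d p => d.modify p.2 ([] : List String) (fun v => v ++ [p.1]))
        PySem.Dict.empty).keys = PySem.Set.ofList (ng.map (fun p => p.2)) := by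
  rw [PySem.Dict.keys_foldl_modify_key ng (fun p => p.2) ([] : List String)
        (fun _ p => fun v => v ++ [p.1]) PySem.Dict.empty,
      PySem.Dict.keys_empty, PySem.Set.update_nil_left]

-- ===== VERDICT (by name: the statement is the Claim_ definition above) =====
theorem format_orden_fallos_spec : Claim_equal_format_orden_fallos := by
  intro ng _
  show format_orden_fallos ng = format_orden_fallos_alt ng
  have hperm : (PySem.List.sorted2 ng (fun x => x.2) (fun x => x.1)).Perm ng :=
    PySem.List.sorted2_perm ng _ _ false
  show String.ofList (PySem.Chars.join ['\n']
      (((pvGroupRuns (PySem.List.sorted2 ng (fun x => x.2) (fun x => x.1))).foldl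
        (fun out gr => out ++ pvBlock gr.1 (PySem.List.sorted (gr.2.map (fun p => p.1)) (fun x => x)))
        pvHeader) ++ [[]]))
    = String.ofList (PySem.Chars.join ['\n']
      (((PySem.List.sorted
            (ng.foldl (fun d p => d.modify p.2 ([] : List String) (fun v => v ++ [p.1]))
              PySem.Dict.empty).keys (fun x => x)).foldl
        (fun out g => out ++ pvBlock g (PySem.List.sorted
          ((ng.foldl (fun d p => d.modify p.2 ([] : List String) (fun v => v ++ [p.1]))
            PySem.Dict.empty).getD g []) (fun x => x)))
        pvHeader) ++ [[]]))
  have e1 : (pvGroupRuns (PySem.List.sorted2 ng (fun x => x.2) (fun x => x.1))).foldl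
        (fun out gr => out ++ pvBlock gr.1 (PySem.List.sorted (gr.2.map (fun p => p.1)) (fun x => x)))
        pvHeader
      = pvHeader ++ (pvGroupRuns (PySem.List.sorted2 ng (fun x => x.2) (fun x => x.1))).flatMap
          (fun gr => pvBlock gr.1 (PySem.List.sorted (gr.2.map (fun p => p.1)) (fun x => x))) :=
    PySem.List.foldl_append_eq_flatMap _ _ _
  have e2 : (PySem.List.sorted
          (ng.foldl (fun d p => d.modify p.2 ([] : List String) (fun v => v ++ [p.1]))
            PySem.Dict.empty).keys (fun x => x)).foldl
        (fun out g => out ++ pvBlock g (PySem.List.sorted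
          ((ng.foldl (fun d p => d.modify p.2 ([] : List String) (fun v => v ++ [p.1]))
            PySem.Dict.empty).getD g []) (fun x => x)))
        pvHeader
      = pvHeader ++ (PySem.List.sorted
          (ng.foldl (fun d p => d.modify p.2 ([] : List String) (fun v => v ++ [p.1]))
            PySem.Dict.empty).keys (fun x => x)).flatMap
          (fun g => pvBlock g (PySem.List.sorted
            ((ng.foldl (fun d p => d.modify p.2 ([] : List String) (fun v => v ++ [p.1]))
              PySem.Dict.empty).getD g []) (fun x => x))) :=
    PySem.List.foldl_append_eq_flatMap _ _ _
  rw [e1, e2]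
  congr 2
  rw [pv_groupRuns_eq _ (pv_sorted2_pairwise_fst ng), List.flatMap_map, pv_dict_keys]
  have hkeys : PySem.List.sorted
        (PySem.Set.ofList ((PySem.List.sorted2 ng (fun x => x.2) (fun x => x.1)).map (fun p => p.2)))
        (fun x => x) =
      PySem.List.sorted (PySem.Set.ofList (ng.map (fun p => p.2))) (fun x => x) :=
    PySem.List.sorted_eq_sorted_of_perm _ _ (fun x => x) Function.injective_id
      (pv_ofList_perm (hperm.map (fun p => p.2)))
  rw [← hkeys]
  refine congrArg (fun z => z ++ [[]]) (congrArg (fun z => pvHeader ++ z) ?_)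
  refine List.flatMap_congr ?_
  intro g _
  have hnodos : PySem.List.sorted
        (((PySem.List.sorted2 ng (fun x => x.2) (fun x => x.1)).filter
          (fun p => p.2 == g)).map (fun p => p.1)) (fun x => x) =
      PySem.List.sorted
        ((ng.foldl (fun d p => d.modify p.2 ([] : List String) (fun v => v ++ [p.1]))
          PySem.Dict.empty).getD g []) (fun x => x) := by
    rw [pv_dict_getD]
    exact (PySem.List.sorted_id_eq_sorted_id_iff_perm _ _).mpr
      ((hperm.filter _).map (fun p => p.1))
  rw [hnodos]
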